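-- pv_equiv track=rewrite | github.com/eric-mugnier/tete-de-veau-ravigote | stats.py | _remove_balanced
-- ===== SOURCE A (Python) =====
-- def _remove_balanced(text: str, cmd: str) -> str:
--     """Remove all occurrences of cmd{...} handling nested braces."""
--     result = []
--     i = 0
--     pattern = cmd + "{"
--     while i < len(text):
--         idx = text.find(pattern, i)
--         if idx == -1:
--             result.append(text[i:])
--             break
--         result.append(text[i:idx])
--         j = idx + len(pattern)  # character after the opening {
--         depth = 1
--         while j < len(text) and depth:
--             if text[j] == "{":
--                 depth += 1
--             elif text[j] == "}":
--                 depth -= 1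
--             j += 1
--         i = j
--     return "".join(result)
-- ===== SOURCE B (Python) =====
-- def _remove_balanced(text: str, cmd: str) -> str:
--     """Remove all occurrences of cmd{...} handling nested braces (single-pass state machine)."""
--     pat = cmd + "{"
--     out = []
--     depth = 0
--     i = 0
--     n = len(text)
--     while i < n:
--         c = text[i]
--         if depth:
--             if c == "{":
--                 depth += 1
--             elif c == "}":
--                 depth -= 1
--             i += 1
--         elif text.startswith(pat, i):
--             depth = 1
--             i += len(pat)
--         else:
--             out.append(c)
--             i += 1
--     return "".join(out)
-- ===== Notes on version B (the rewrite author's own statement) =====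
-- stated objective: alternative
-- what changed: Replaces A's outer find()+slice loop with a nested depth-consuming while by a single left-to-right per-character state machine (emit mode tests the pattern at the current position; skip mode maintains a brace-depth counter).
import Mathlib
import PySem

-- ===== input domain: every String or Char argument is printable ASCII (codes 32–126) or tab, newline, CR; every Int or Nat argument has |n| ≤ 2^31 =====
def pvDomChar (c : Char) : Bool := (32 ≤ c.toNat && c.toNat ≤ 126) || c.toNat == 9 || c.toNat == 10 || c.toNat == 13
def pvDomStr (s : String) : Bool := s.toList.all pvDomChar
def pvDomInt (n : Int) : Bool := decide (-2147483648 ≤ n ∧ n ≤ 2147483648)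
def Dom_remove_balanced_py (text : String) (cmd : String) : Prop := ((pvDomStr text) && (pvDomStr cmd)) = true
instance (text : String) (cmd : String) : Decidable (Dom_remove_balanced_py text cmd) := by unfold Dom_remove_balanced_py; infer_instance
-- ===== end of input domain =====

-- B replaces A's find+slice+inner-skip-loop by a single left-to-right character-level
-- state machine (emit / skip-with-depth); same return value, alternative decomposition.


-- ===== PORT A =====
-- A's inner 'while j < len(text) and depth' loop: state (remaining suffix, depth).
def pvSkipA (cs : List Char) (depth : Nat) : List Char :=
  match cs, depth with
  | cs, 0 => cs
  | [], _ + 1 => []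
  | c :: t, d + 1 =>
      pvSkipA t (if c = '{' then d + 2 else if c = '}' then d else d + 1)

-- cited by pyLoopA's decreasing_by
theorem pvSkipA_length_le (cs : List Char) (d : Nat) : (pvSkipA cs d).length ≤ cs.length := by
  induction cs generalizing d with
  | nil => cases d <;> simp [pvSkipA]
  | cons c t ih =>
      cases d with
      | zero => simp [pvSkipA]
      | succ d => exact le_trans (ih _) (by simp)

-- cited by pyLoopA's decreasing_by
theorem pvFind_nil (pre : List Char) :
    PySem.Chars.find [] (pre ++ ['{']) = -1 := by
  unfold PySem.Chars.find PySem.Chars.find.go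
  cases pre <;> simp

-- A's outer while loop; the index i is represented by the suffix text[i:],
-- and text.find(pattern, i) by Chars.find on that suffix (same first match).
def pyLoopA (cmdl : List Char) (rest : List Char) : List Char :=
  if h : PySem.Chars.find rest (cmdl ++ ['{']) = -1 then rest
  else
    rest.take (PySem.Chars.find rest (cmdl ++ ['{'])).toNat ++
      pyLoopA cmdl
        (pvSkipA (rest.drop ((PySem.Chars.find rest (cmdl ++ ['{'])).toNat + (cmdl ++ ['{']).length)) 1)
termination_by rest.length
decreasing_by
  have hne : rest ≠ [] := by
    intro hr; exact h (hr ▸ pvFind_nil cmdl)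
  have h1 := pvSkipA_length_le (rest.drop ((PySem.Chars.find rest (cmdl ++ ['{'])).toNat + (cmdl ++ ['{']).length)) 1
  have h2 : (cmdl ++ ['{']).length = cmdl.length + 1 := by simp
  have h3 : 0 < rest.length := List.length_pos_iff.mpr hne
  simp only [List.length_drop] at h1
  omega

def remove_balanced_py (text : String) (cmd : String) : String :=
  String.ofList (pyLoopA cmd.toList text.toList)

-- ===== PORT B =====
-- B's single-pass machine: depth = 0 means emitting, depth > 0 means skipping.
def pvMachB (cmdl : List Char) (cs : List Char) (depth : Nat) : List Char :=
  match cs, depth with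
  | [], _ => []
  | c :: t, d + 1 =>
      pvMachB cmdl t (if c = '{' then d + 2 else if c = '}' then d else d + 1)
  | c :: t, 0 =>
      if (cmdl ++ ['{']).isPrefixOf (c :: t) then
        pvMachB cmdl ((c :: t).drop (cmdl.length + 1)) 1
      else
        c :: pvMachB cmdl t 0
termination_by cs.length
decreasing_by
  · simp
  · simp only [List.length_drop, List.length_cons]; omega
  · simp

def remove_balanced_py_alt (text : String) (cmd : String) : String :=
  String.ofList (pvMachB cmd.toList text.toList 0)

-- ===== PRECONDITION & SPEC =====
def Spec_remove_balanced_py (text : String) (cmd : String) (out : String) : Prop := out = remove_balanced_py_alt text cmd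
instance (text : String) (cmd : String) (out : String) : Decidable (Spec_remove_balanced_py text cmd out) := by unfold Spec_remove_balanced_py; infer_instance

-- ===== CLAIM (what is proved, stated in full; the proofs are below) =====
def Claim_equal_remove_balanced_py : Prop := ∀ (text : String) (cmd : String), Dom_remove_balanced_py text cmd → Spec_remove_balanced_py text cmd (remove_balanced_py text cmd)

-- ===== LEMMAS AND PROOFS =====

-- unfolding equations for B's machine (well-founded def)
theorem pvMachB_nil (cmdl : List Char) (d : Nat) : pvMachB cmdl [] d = [] := by
  rw [pvMachB]

theorem pvMachB_succ (cmdl : List Char) (c : Char) (t : List Char) (d : Nat) :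
    pvMachB cmdl (c :: t) (d + 1) =
      pvMachB cmdl t (if c = '{' then d + 2 else if c = '}' then d else d + 1) := by
  rw [pvMachB]

theorem pvMachB_zero (cmdl : List Char) (c : Char) (t : List Char) :
    pvMachB cmdl (c :: t) 0 =
      if (cmdl ++ ['{']).isPrefixOf (c :: t) then
        pvMachB cmdl ((c :: t).drop (cmdl.length + 1)) 1
      else c :: pvMachB cmdl t 0 := by
  rw [pvMachB]

theorem pvFind_nonneg {s sub : List Char} (h : PySem.Chars.find s sub ≠ -1) :
    0 ≤ PySem.Chars.find s sub := by
  have := PySem.Chars.findFrom_natCast_spec s sub 0 (by simp)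
  norm_num [PySem.Chars.findFrom_zero] at this
  exact (this h).1

-- glue about the library's find.go: shifting the running index
theorem pvGo_eq (sub : List Char) (s : List Char) (k : Nat) :
    PySem.Chars.find.go sub s k =
      if PySem.Chars.find s sub = -1 then -1 else PySem.Chars.find s sub + k := by
  induction s generalizing k with
  | nil =>
      by_cases he : sub.isEmpty <;>
        simp [PySem.Chars.find, PySem.Chars.find.go, he]
  | cons c t ih =>
      by_cases hp : sub.isPrefixOf (c :: t)
      · simp [PySem.Chars.find, PySem.Chars.find.go, hp]
      · rw [show PySem.Chars.find.go sub (c :: t) k = PySem.Chars.find.go sub t (k + 1) by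
            simp [PySem.Chars.find.go, hp],
          show PySem.Chars.find (c :: t) sub = PySem.Chars.find.go sub t 1 by
            simp [PySem.Chars.find, PySem.Chars.find.go, hp],
          ih, ih]
        by_cases hf : PySem.Chars.find t sub = -1
        · simp [hf]
        · have h0 : 0 ≤ PySem.Chars.find t sub := pvFind_nonneg hf
          rw [if_neg hf, if_neg (by omega), if_neg (by omega)]
          push_cast; ring

theorem pvFind_cons_of_not_prefix {sub : List Char} {c : Char} {t : List Char}
    (hp : ¬ sub.isPrefixOf (c :: t)) :
    PySem.Chars.find (c :: t) sub =
      if PySem.Chars.find t sub = -1 then -1 else PySem.Chars.find t sub + 1 := by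
  rw [show PySem.Chars.find (c :: t) sub = PySem.Chars.find.go sub t 1 by
        simp [PySem.Chars.find, PySem.Chars.find.go, hp],
      pvGo_eq]
  norm_num

theorem pvFind_of_prefix {sub : List Char} {c : Char} {t : List Char}
    (hp : sub.isPrefixOf (c :: t)) : PySem.Chars.find (c :: t) sub = 0 := by
  simp [PySem.Chars.find, PySem.Chars.find.go, hp]

-- while skipping, B's machine consumes exactly A's inner loop's characters
theorem pvMachB_skip (cmdl : List Char) (cs : List Char) (d : Nat) :
    pvMachB cmdl cs (d + 1) = pvMachB cmdl (pvSkipA cs (d + 1)) 0 := by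
  induction cs generalizing d with
  | nil => simp [pvMachB_nil, pvSkipA]
  | cons c t ih =>
      rw [pvMachB_succ,
          show pvSkipA (c :: t) (d + 1) =
            pvSkipA t (if c = '{' then d + 2 else if c = '}' then d else d + 1) from rfl]
      cases hd : (if c = '{' then d + 2 else if c = '}' then d else d + 1) with
      | zero => rw [show pvSkipA t 0 = t by cases t <;> rw [pvSkipA]]
      | succ e => exact ih e

theorem pvMain (cmdl : List Char) (n : Nat) :
    ∀ rest : List Char, rest.length ≤ n → pyLoopA cmdl rest = pvMachB cmdl rest 0 := by
  induction n with
  | zero =>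
      intro rest hlen
      have : rest = [] := List.eq_nil_of_length_eq_zero (Nat.le_zero.mp hlen)
      subst this
      rw [pyLoopA, pvMachB_nil]
      simp [pvFind_nil]
  | succ n ih =>
      intro rest hlen
      by_cases hp : (cmdl ++ ['{']).isPrefixOf rest
      · -- match at the front: A finds it at index 0, B enters skipping mode
        obtain ⟨c, t, rfl⟩ : ∃ c t, rest = c :: t := by
          cases rest with
          | nil => simp at hp
          | cons c t => exact ⟨c, t, rfl⟩
        have hf := pvFind_of_prefix hp
        have hlen2 : (pvSkipA ((c :: t).drop (cmdl.length + 1)) 1).length ≤ n := by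
          have := pvSkipA_length_le ((c :: t).drop (cmdl.length + 1)) 1
          simp only [List.length_drop, List.length_cons] at this hlen
          omega
        rw [pyLoopA]
        rw [dif_neg (by rw [hf]; norm_num)]
        rw [hf]
        rw [show ((0 : Int).toNat + (cmdl ++ ['{']).length) = cmdl.length + 1 by simp]
        rw [show ((0 : Int).toNat) = 0 from rfl, List.take_zero, List.nil_append]
        rw [pvMachB_zero, if_pos hp, pvMachB_skip cmdl _ 0]
        exact ih _ hlen2
      · cases rest with
        | nil => rw [pyLoopA, pvMachB_nil]; simp [pvFind_nil]
        | cons c t =>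
          have hcons := pvFind_cons_of_not_prefix hp
          have hB : pvMachB cmdl (c :: t) 0 = c :: pvMachB cmdl t 0 := by
            rw [pvMachB_zero, if_neg hp]
          have hlent : t.length ≤ n := by simp only [List.length_cons] at hlen; omega
          by_cases hf : PySem.Chars.find t (cmdl ++ ['{']) = -1
          · -- no occurrence anywhere: A copies the whole rest verbatim
            have hf2 : PySem.Chars.find (c :: t) (cmdl ++ ['{']) = -1 := by
              rw [hcons, if_pos hf]
            rw [pyLoopA, dif_pos hf2, hB, ← ih t hlent, pyLoopA, dif_pos hf]
          · -- the first occurrence is one position further than in the tail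
            have hm : 0 ≤ PySem.Chars.find t (cmdl ++ ['{']) := pvFind_nonneg hf
            have hf2 : PySem.Chars.find (c :: t) (cmdl ++ ['{']) =
                PySem.Chars.find t (cmdl ++ ['{']) + 1 := by rw [hcons, if_neg hf]
            have htn : (PySem.Chars.find t (cmdl ++ ['{']) + 1).toNat =
                (PySem.Chars.find t (cmdl ++ ['{'])).toNat + 1 := by omega
            conv_lhs => rw [pyLoopA]
            rw [hf2, dif_neg (show ¬(PySem.Chars.find t (cmdl ++ ['{']) + 1 = -1) by omega), htn]
            rw [show (PySem.Chars.find t (cmdl ++ ['{'])).toNat + 1 + (cmdl ++ ['{']).length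
                  = ((PySem.Chars.find t (cmdl ++ ['{'])).toNat + (cmdl ++ ['{']).length) + 1 by omega]
            rw [List.take_succ_cons, List.drop_succ_cons]
            rw [hB, ← ih t hlent]
            conv_rhs => rw [pyLoopA]
            rw [dif_neg hf, List.cons_append]

-- ===== VERDICT (by name: the statement is the Claim_ definition above) =====
theorem remove_balanced_py_spec : Claim_equal_remove_balanced_py := by
  intro text cmd _
  unfold Spec_remove_balanced_py remove_balanced_py remove_balanced_py_alt
  rw [pvMain cmd.toList text.toList.length text.toList le_rfl]
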